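-- pv_equiv track=rewrite | github.com/arjun619/DSA_practice | love_babbar/arrays/alternate_posi_nega/sol.py | rotator
-- ===== SOURCE A (Python) =====
-- def rotator(arr,i,j):
--     temp=[]
--     for k in range(i,j):
--         temp.append(arr[k])
--     count=0
--     for k in range(i,j):
--         arr[k+1]=temp[count]
--         count+=1
--     return arr
-- ===== SOURCE B (Python) =====
-- def rotator(arr, i, j):
--     for k in range(j, i, -1):
--         arr[k] = arr[k - 1]
--     return arr
-- ===== Notes on version B (the rewrite author's own statement) =====
-- stated objective: simpler
-- what changed: Replaced the temp-buffer copy pass plus forward write pass with a single in-place backward shift (arr[k]=arr[k-1] for k from j down to i+1), removing the auxiliary list and the counter.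
-- outside the precondition, e.g. on rotator([1, 2, 3], -1, 2): A returns [3, 1, 2], B returns [2, 1, 2]
import Mathlib
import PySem

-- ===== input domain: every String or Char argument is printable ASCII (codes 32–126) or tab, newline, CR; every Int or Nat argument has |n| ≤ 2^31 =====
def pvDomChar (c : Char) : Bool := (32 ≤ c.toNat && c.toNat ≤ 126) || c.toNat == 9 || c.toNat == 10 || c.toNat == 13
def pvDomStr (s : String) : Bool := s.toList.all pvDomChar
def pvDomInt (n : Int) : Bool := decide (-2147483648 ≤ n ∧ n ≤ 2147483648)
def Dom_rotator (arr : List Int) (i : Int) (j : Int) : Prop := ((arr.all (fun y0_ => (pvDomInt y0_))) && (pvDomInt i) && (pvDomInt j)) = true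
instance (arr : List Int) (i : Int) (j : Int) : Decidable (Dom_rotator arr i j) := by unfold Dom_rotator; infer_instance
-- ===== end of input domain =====

-- B replaces A's temp-buffer two-pass with a single in-place backward shift (no auxiliary list, no counter).
-- Equivalence is about the RETURN value; on Pre_ both Pythons also leave arr mutated to the same contents.

-- ===== PORT A =====
def rotator (arr : List Int) (i : Int) (j : Int) : List Int :=
  let temp := (PySem.List.pyRange i j 1).foldl
      (fun t k => t ++ [PySem.List.pyGetD arr k 0]) []
  let st := (PySem.List.pyRange i j 1).foldl
      (fun (p : List Int × Int) k =>
        (PySem.List.pySetD p.1 (k + 1) (PySem.List.pyGetD temp p.2 0), p.2 + 1))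
      (arr, 0)
  st.1

-- ===== PORT B =====
def rotator_alt (arr : List Int) (i : Int) (j : Int) : List Int :=
  (PySem.List.pyRange j i (-1)).foldl
    (fun a k => PySem.List.pySetD a k (PySem.List.pyGetD a (k - 1) 0)) arr

-- ===== PRECONDITION & SPEC =====
-- Pre_ restricts a nonempty range to the natural domain of "shift the subrange arr[i..j-1] right by one":
-- 0 ≤ i and j < len(arr).  It excludes (a) i < j with j ≥ len(arr) or i < -len(arr), where A raises
-- IndexError, and (b) i < j with a negative in-range i, where A still returns but its value is an accident
-- of Python's negative-index wraparound and B's natural in-place shift returns a different value (cite in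
-- claim.json).  Every i ≥ j input (both programs: no-op, return arr) is admitted.
def Pre_rotator (arr : List Int) (i : Int) (j : Int) : Prop :=
  i < j → (0 ≤ i ∧ j < (arr.length : Int))
instance (arr : List Int) (i : Int) (j : Int) : Decidable (Pre_rotator arr i j) := by
  unfold Pre_rotator; infer_instance

def pvWitness_rotator : List Int × Int × Int := ([5, 1, 2, 3, 9], 1, 4)

def Spec_rotator (arr : List Int) (i : Int) (j : Int) (out : List Int) : Prop := out = rotator_alt arr i j
instance (arr : List Int) (i : Int) (j : Int) (out : List Int) : Decidable (Spec_rotator arr i j out) := by unfold Spec_rotator; infer_instance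

-- ===== CLAIM (what is proved, stated in full; the proofs are below) =====
def Claim_equal_rotator : Prop := ∀ (arr : List Int) (i : Int) (j : Int), Dom_rotator arr i j → Pre_rotator arr i j → Spec_rotator arr i j (rotator arr i j)

-- ===== LEMMAS AND PROOFS =====

-- A's write pass with the counter resolved: writes lst[k+1] := arr[k] for k in range(m, j).
def pvFwd (arr : List Int) (j m : Int) (lst : List Int) : List Int :=
  (PySem.List.pyRange m j 1).foldl
    (fun a k => PySem.List.pySetD a (k + 1) (PySem.List.pyGetD arr k 0)) lst

-- Pointwise value of A's write pass.
lemma pvFwd_getElem? (arr : List Int) (j : Int) (hj : j < (arr.length : Int)) :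
    ∀ m : Int, 0 ≤ m →
    ∀ lst : List Int, lst.length = arr.length →
    ∀ t : Nat, (pvFwd arr j m lst)[t]? =
      if m < (t : Int) ∧ (t : Int) ≤ j then arr[t - 1]? else lst[t]? := by
  intro m hm lst hlen t
  induction hn : (j - m).toNat generalizing m lst with
  | zero =>
    have hjm : j ≤ m := by omega
    rw [pvFwd, PySem.List.pyRange_one_eq_nil hjm]
    simp only [List.foldl_nil]
    rw [if_neg (by omega)]
  | succ n ih =>
    have hmj : m < j := by omega
    rw [pvFwd, PySem.List.pyRange_one_cons hmj, List.foldl_cons, ← pvFwd]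
    have hset : PySem.List.pySetD lst (m + 1) (PySem.List.pyGetD arr m 0)
        = lst.set (m + 1).toNat (PySem.List.pyGetD arr m 0) :=
      PySem.List.pySetD_of_nonneg _ _ (by omega)
    have hlen' : (PySem.List.pySetD lst (m + 1) (PySem.List.pyGetD arr m 0)).length = arr.length := by
      rw [PySem.List.length_pySetD, hlen]
    rw [ih (m + 1) (by omega) _ hlen' (by omega)]
    by_cases h1 : (m + 1) < (t : Int) ∧ (t : Int) ≤ j
    · rw [if_pos h1, if_pos (by omega)]
    · rw [if_neg h1, hset, List.getElem?_set]
      by_cases h2 : (m + 1).toNat = t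
      · have ht : (t : Int) = m + 1 := by omega
        rw [if_pos h2, if_pos (by omega), if_pos (by omega)]
        have hmn : m.toNat < arr.length := by omega
        have ht1 : t - 1 = m.toNat := by omega
        rw [ht1, List.getElem?_eq_getElem hmn]
        rw [PySem.List.pyGetD_of_nonneg _ _ hm, List.getD_eq_getElem?_getD,
          List.getElem?_eq_getElem hmn]
        simp
      · rw [if_neg h2, if_neg (by omega)]

-- Pointwise value of B's backward shift: each read happens before that cell is overwritten.
lemma pvBwd_getElem? (i : Int) (hi : 0 ≤ i) :
    ∀ m : Int, ∀ arr : List Int, m < (arr.length : Int) →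
    ∀ t : Nat,
      ((PySem.List.pyRange m i (-1)).foldl
        (fun a k => PySem.List.pySetD a k (PySem.List.pyGetD a (k - 1) 0)) arr)[t]? =
      if i < (t : Int) ∧ (t : Int) ≤ m then arr[t - 1]? else arr[t]? := by
  intro m
  induction hn : (m - i).toNat generalizing m with
  | zero =>
    intro arr hm t
    have hmi : m ≤ i := by omega
    rw [PySem.List.pyRange_neg_one_eq_nil hmi, List.foldl_nil, if_neg (by omega)]
  | succ n ih =>
    intro arr hm t
    have him : i < m := by omega
    rw [PySem.List.pyRange_neg_one_cons him, List.foldl_cons]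
    set arr' := PySem.List.pySetD arr m (PySem.List.pyGetD arr (m - 1) 0) with harr'
    have hlen' : arr'.length = arr.length := PySem.List.length_pySetD _ _ _
    rw [ih (m - 1) (by omega) arr' (by omega) t]
    have hset : arr' = arr.set m.toNat (PySem.List.pyGetD arr (m - 1) 0) :=
      PySem.List.pySetD_of_nonneg _ _ (by omega)
    have hget : ∀ s : Nat, s ≠ m.toNat → arr'[s]? = arr[s]? := by
      intro s hs
      rw [hset, List.getElem?_set, if_neg (Ne.symm hs)]
    by_cases h1 : i < (t : Int) ∧ (t : Int) ≤ m - 1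
    · rw [if_pos h1, if_pos (by omega), hget (t - 1) (by omega)]
    · rw [if_neg h1]
      by_cases h2 : (t : Int) = m
      · have htm : t = m.toNat := by omega
        rw [if_pos (by omega), hset, htm, List.getElem?_set, if_pos rfl, if_pos (by omega)]
        have hm1 : m.toNat - 1 < arr.length := by omega
        rw [PySem.List.pyGetD_of_nonneg _ _ (by omega : (0:Int) ≤ m - 1),
          List.getD_eq_getElem?_getD]
        have : (m - 1).toNat = m.toNat - 1 := by omega
        rw [this, List.getElem?_eq_getElem hm1]
        simp
      · rw [if_neg (by omega), hget t (by omega)]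

-- A's first pass builds temp = arr[i..j-1]; its entry at count k - i is arr[k].
lemma pvTemp (arr : List Int) (i j : Int) :
    ∀ k : Int, i ≤ k → k < j →
      PySem.List.pyGetD
        ((PySem.List.pyRange i j 1).foldl (fun t k => t ++ [PySem.List.pyGetD arr k 0]) [])
        (k - i) 0 = PySem.List.pyGetD arr k 0 := by
  intro k hik hkj
  rw [PySem.List.foldl_append_singleton_eq_map]
  rw [PySem.List.pyGetD_of_nonneg _ _ (by omega : (0:Int) ≤ k - i)]
  rw [List.getD_eq_getElem?_getD, List.nil_append, List.getElem?_map]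
  have hlt : (k - i).toNat < (PySem.List.pyRange i j 1).length := by
    rw [PySem.List.length_pyRange_one]; omega
  rw [List.getElem?_eq_getElem hlt, PySem.List.getElem_pyRange_one]
  simp only [Option.map_some, Option.getD_some]
  congr 1
  omega

def pvPairStep (temp : List Int) : List Int × Int → Int → List Int × Int :=
  fun p k => (PySem.List.pySetD p.1 (k + 1) (PySem.List.pyGetD temp p.2 0), p.2 + 1)

-- A's counter invariant: starting the pair-fold at (lst, m - i), the list component is pvFwd.
lemma pvA_counter (arr temp : List Int) (i j : Int)
    (htemp : ∀ k : Int, i ≤ k → k < j →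
      PySem.List.pyGetD temp (k - i) 0 = PySem.List.pyGetD arr k 0) :
    ∀ m : Int, i ≤ m →
    ∀ lst : List Int,
      ((PySem.List.pyRange m j 1).foldl (pvPairStep temp) (lst, m - i)).1
        = pvFwd arr j m lst := by
  intro m
  induction hn : (j - m).toNat generalizing m with
  | zero =>
    intro hm lst
    rw [PySem.List.pyRange_one_eq_nil (by omega), pvFwd,
      PySem.List.pyRange_one_eq_nil (by omega)]
    simp
  | succ n ih =>
    intro hm lst
    have hmj : m < j := by omega
    rw [PySem.List.pyRange_one_cons hmj, List.foldl_cons, pvFwd,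
      PySem.List.pyRange_one_cons hmj, List.foldl_cons, ← pvFwd]
    have hstep : pvPairStep temp (lst, m - i) m
        = (PySem.List.pySetD lst (m + 1) (PySem.List.pyGetD arr m 0), (m + 1) - i) := by
      rw [pvPairStep, htemp m hm hmj]
      simp only [Prod.mk.injEq]
      exact ⟨trivial, by omega⟩
    rw [hstep, ih (m + 1) (by omega) (by omega)]

lemma pv_main (arr : List Int) (i j : Int)
    (hpre : i < j → (0 ≤ i ∧ j < (arr.length : Int))) :
    rotator arr i j = rotator_alt arr i j := by
  by_cases hij : i < j
  · obtain ⟨hi, hjlen⟩ := hpre hij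
    have hA : rotator arr i j = pvFwd arr j i arr := by
      rw [rotator]
      rw [show ((arr, (0 : Int)) : List Int × Int) = (arr, i - i) by rw [sub_self]]
      exact pvA_counter arr _ i j (pvTemp arr i j) i le_rfl arr
    rw [hA, rotator_alt]
    apply List.ext_getElem?
    intro t
    rw [pvFwd_getElem? arr j hjlen i hi arr rfl t,
      pvBwd_getElem? i hi j arr hjlen t]
  · have hji : j ≤ i := by omega
    rw [rotator, rotator_alt, PySem.List.pyRange_one_eq_nil hji,
      PySem.List.pyRange_neg_one_eq_nil hji]
    simp

-- ===== VERDICT (by name: the statement is the Claim_ definition above) =====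
theorem rotator_spec : Claim_equal_rotator := by
  intro arr i j _ hpre
  show rotator arr i j = rotator_alt arr i j
  exact pv_main arr i j hpre
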